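-- pv_equiv track=rewrite | github.com/Yang-Jianlin/python-learn | python数据结构与算法/fourth_chapter/C-4.17.py | reserve
-- ===== SOURCE A (Python) =====
-- def reserve(s, start, end, n):
--     if start >= end:
--         if n >= len(s) // 2:
--             return True
--         else:
--             return False
--     else:
--         if s[start] == s[end]:
--             n += 1
--         return reserve(s, start+1, end-1, n)
-- ===== SOURCE B (Python) =====
-- def reserve(s, start, end, n):
--     pairs = (end - start + 1) // 2
--     n += sum(1 for k in range(pairs) if s[start + k] == s[end - k])
--     return n >= len(s) // 2
-- ===== Notes on version B (the rewrite author's own statement) =====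
-- stated objective: simpler
-- what changed: Replaces the two-pointer tail recursion by a closed-form pair count: B computes pairs=(end-start+1)//2 once and sums the matches with one range comprehension, no recursion and no pointer updates.
import Mathlib
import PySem

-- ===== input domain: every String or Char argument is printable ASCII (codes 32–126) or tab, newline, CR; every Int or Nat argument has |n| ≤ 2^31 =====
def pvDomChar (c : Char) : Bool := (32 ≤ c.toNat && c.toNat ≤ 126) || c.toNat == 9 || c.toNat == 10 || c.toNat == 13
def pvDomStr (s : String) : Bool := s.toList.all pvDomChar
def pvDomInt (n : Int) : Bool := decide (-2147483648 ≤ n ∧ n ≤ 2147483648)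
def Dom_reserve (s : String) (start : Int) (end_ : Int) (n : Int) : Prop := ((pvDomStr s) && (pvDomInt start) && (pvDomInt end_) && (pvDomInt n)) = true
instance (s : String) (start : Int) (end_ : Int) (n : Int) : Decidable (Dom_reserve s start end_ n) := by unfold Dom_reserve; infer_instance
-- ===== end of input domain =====

-- B replaces A's two-pointer tail recursion by a closed-form pair count: it sums the
-- matches over range((end-start+1)//2) in one comprehension (objective: simpler; same cost).

-- ===== PORT A =====
-- literal transliteration of A's tail recursion; s[i] = PySem.Str.pyGet? (exact Python indexing)
def reserve (s : String) (start : Int) (end_ : Int) (n : Int) : Bool :=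
  if start ≥ end_ then
    decide (n ≥ PySem.Int.floordiv (PySem.Str.len s) 2)
  else
    let n' := if PySem.Str.pyGet? s start = PySem.Str.pyGet? s end_ then n + 1 else n
    reserve s (start + 1) (end_ - 1) n'
termination_by (end_ - start).toNat
decreasing_by omega

-- ===== PORT B =====
-- transliteration of Source B: pairs = (end-start+1)//2; n += sum(1 for k in range(pairs) if s[start+k]==s[end-k]); return n >= len(s)//2
def reserve_alt (s : String) (start : Int) (end_ : Int) (n : Int) : Bool :=
  let pairs := PySem.Int.floordiv (end_ - start + 1) 2
  let cnt := (PySem.List.pyRange 0 pairs 1).foldl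
      (fun acc k => acc + (if PySem.Str.pyGet? s (start + k) = PySem.Str.pyGet? s (end_ - k) then (1 : Int) else 0)) 0
  decide (n + cnt ≥ PySem.Int.floordiv (PySem.Str.len s) 2)

-- ===== PRECONDITION & SPEC =====
-- Pre_ excludes exactly the inputs where A raises IndexError (the first index pair out of range);
-- when start ≥ end_ no indexing happens and A always returns.
def Pre_reserve (s : String) (start : Int) (end_ : Int) (n : Int) : Prop :=
  start < end_ → (-(PySem.Str.len s) ≤ start ∧ end_ < PySem.Str.len s)
instance (s : String) (start : Int) (end_ : Int) (n : Int) : Decidable (Pre_reserve s start end_ n) := by unfold Pre_reserve; infer_instance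
def pvWitness_reserve : String × Int × Int × Int := ("abcba", 0, 4, 0)
def Spec_reserve (s : String) (start : Int) (end_ : Int) (n : Int) (out : Bool) : Prop := out = reserve_alt s start end_ n
instance (s : String) (start : Int) (end_ : Int) (n : Int) (out : Bool) : Decidable (Spec_reserve s start end_ n out) := by unfold Spec_reserve; infer_instance

-- ===== CLAIM (what is proved, stated in full; the proofs are below) =====
def Claim_equal_reserve : Prop := ∀ (s : String) (start : Int) (end_ : Int) (n : Int), Dom_reserve s start end_ n → Pre_reserve s start end_ n → Spec_reserve s start end_ n (reserve s start end_ n)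

-- ===== LEMMAS AND PROOFS =====

-- the match count of B, written as a sum over List.range
def pvS (s : String) (a b : Int) : Int :=
  ((List.range (PySem.Int.floordiv (b - a + 1) 2).toNat).map
    (fun k : Nat => if PySem.Str.pyGet? s (a + k) = PySem.Str.pyGet? s (b - k) then (1 : Int) else 0)).sum

theorem reserve_alt_eq_pvS (s : String) (a b n : Int) :
    reserve_alt s a b n = decide (n + pvS s a b ≥ PySem.Int.floordiv (PySem.Str.len s) 2) := by
  simp only [reserve_alt]
  rw [PySem.List.foldl_add, PySem.List.pyRange_one, List.map_map]
  unfold pvS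
  simp [Function.comp_def]

theorem pvS_base (s : String) (a b : Int) (h : b ≤ a) : pvS s a b = 0 := by
  have h2 : PySem.Int.floordiv (b - a + 1) 2 = (b - a + 1) / 2 :=
    PySem.Int.floordiv_eq_ediv_of_pos (by norm_num)
  have : (PySem.Int.floordiv (b - a + 1) 2).toNat = 0 := by rw [h2]; omega
  unfold pvS
  rw [this]
  simp

theorem pvS_step (s : String) (a b : Int) (h : a < b) :
    pvS s a b = (if PySem.Str.pyGet? s a = PySem.Str.pyGet? s b then (1 : Int) else 0)
      + pvS s (a + 1) (b - 1) := by
  have h2 : ∀ x : Int, PySem.Int.floordiv x 2 = x / 2 := fun x =>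
    PySem.Int.floordiv_eq_ediv_of_pos (by norm_num)
  have hm : (PySem.Int.floordiv (b - a + 1) 2).toNat
      = (PySem.Int.floordiv (b - 1 - (a + 1) + 1) 2).toNat + 1 := by
    rw [h2, h2]; omega
  unfold pvS
  rw [hm, List.range_succ_eq_map, List.map_cons, List.map_map, List.sum_cons]
  congr 1
  · simp
  · congr 1
    apply List.map_congr_left
    intro k _
    have e1 : a + ((k : Int) + 1) = a + 1 + (k : Int) := by ring
    have e2 : b - ((k : Int) + 1) = b - 1 - (k : Int) := by ring
    simp only [Function.comp]
    push_cast
    simp only [e1, e2]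

theorem reserve_eq_pvS (d : Nat) : ∀ (s : String) (a b n : Int), (b - a).toNat = d →
    reserve s a b n = decide (n + pvS s a b ≥ PySem.Int.floordiv (PySem.Str.len s) 2) := by
  induction d using Nat.strong_induction_on with
  | _ d ih =>
    intro s a b n hd
    by_cases h : a ≥ b
    · rw [reserve, if_pos h, pvS_base s a b h, add_zero]
    · rw [not_le] at h
      rw [reserve, if_neg (by omega)]
      have hrec := ih (b - 1 - (a + 1)).toNat (by omega) s (a + 1) (b - 1)
        (if PySem.Str.pyGet? s a = PySem.Str.pyGet? s b then n + 1 else n) rfl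
      rw [hrec, pvS_step s a b h]
      congr 1
      split_ifs <;> ring_nf

-- ===== VERDICT (by name: the statement is the Claim_ definition above) =====
theorem reserve_spec : Claim_equal_reserve := by
  intro s start end_ n _ _
  unfold Spec_reserve
  rw [reserve_eq_pvS ((end_ - start).toNat) s start end_ n rfl, reserve_alt_eq_pvS]
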